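-- pv_equiv track=rewrite | github.com/Ivan-dias99/Gauntlet- | signal-backend/source_verification.py | score_domain
-- ===== SOURCE A (Python) =====
-- from typing import Literal
--
-- TrustScore = Literal["high", "medium", "low", "unknown"]
--
-- _HIGH_TRUST_TLDS = {".gov", ".edu", ".gov.uk", ".gov.pt", ".eu"}
--
-- _HIGH_TRUST_HOSTS = {
--     "wikipedia.org", "developer.mozilla.org", "rfc-editor.org",
--     "ietf.org", "w3.org", "iana.org", "iso.org",
--     "npmjs.com", "pypi.org", "crates.io",
--     "react.dev", "nodejs.org", "python.org",
--     "github.com", "gitlab.com",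
--     "anthropic.com", "openai.com", "vercel.com", "railway.com",
-- }
--
-- _LOW_TRUST_HOSTS = {
--     "bit.ly", "tinyurl.com", "goo.gl", "t.co", "ow.ly",
--     "buff.ly", "is.gd", "lnkd.in",
-- }
--
-- def score_domain(host: str) -> TrustScore:
--     """Score a hostname via heuristic. No network calls, no DB."""
--     if not host:
--         return "unknown"
--     host = host.lower().strip(".")
--     if host in _LOW_TRUST_HOSTS:
--         return "low"
--     # Subdomain match against low-trust hosts (www.bit.ly → bit.ly)
--     for known in _LOW_TRUST_HOSTS:
--         if host.endswith("." + known):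
--             return "low"
--     if host in _HIGH_TRUST_HOSTS:
--         return "high"
--     # Subdomain match against high-trust hosts (api.github.com → github.com)
--     for known in _HIGH_TRUST_HOSTS:
--         if host.endswith("." + known):
--             return "high"
--     # TLD match
--     for tld in _HIGH_TRUST_TLDS:
--         if host.endswith(tld):
--             return "high"
--     return "medium"
-- ===== SOURCE B (Python) =====
-- _HIGH_TRUST_TLD_LABELS = {"gov", "edu", "gov.uk", "gov.pt", "eu"}
--
-- _HIGH_TRUST_HOSTS = {
--     "wikipedia.org", "developer.mozilla.org", "rfc-editor.org",
--     "ietf.org", "w3.org", "iana.org", "iso.org",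
--     "npmjs.com", "pypi.org", "crates.io",
--     "react.dev", "nodejs.org", "python.org",
--     "github.com", "gitlab.com",
--     "anthropic.com", "openai.com", "vercel.com", "railway.com",
-- }
--
-- _LOW_TRUST_HOSTS = {
--     "bit.ly", "tinyurl.com", "goo.gl", "t.co", "ow.ly",
--     "buff.ly", "is.gd", "lnkd.in",
-- }
--
-- def score_domain(host: str) -> str:
--     """Score a hostname by looking up its dot-suffixes in the trust sets."""
--     if not host:
--         return "unknown"
--     host = host.lower().strip(".")
--     # everything after each '.' in host, in order (proper dot-suffixes)
--     suffixes = [host[i + 1:] for i, ch in enumerate(host) if ch == "."]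
--     if host in _LOW_TRUST_HOSTS or any(s in _LOW_TRUST_HOSTS for s in suffixes):
--         return "low"
--     if host in _HIGH_TRUST_HOSTS or any(s in _HIGH_TRUST_HOSTS for s in suffixes):
--         return "high"
--     if any(s in _HIGH_TRUST_TLD_LABELS for s in suffixes):
--         return "high"
--     return "medium"
-- ===== Notes on version B (the rewrite author's own statement) =====
-- stated objective: alternative
-- what changed: B computes the list of the host's proper dot-suffixes once and decides each trust tier by set membership of those suffixes, instead of A's loops over the constant sets with endswith tests (the TLD set stored as bare labels without the leading dot).
import Mathlib
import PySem

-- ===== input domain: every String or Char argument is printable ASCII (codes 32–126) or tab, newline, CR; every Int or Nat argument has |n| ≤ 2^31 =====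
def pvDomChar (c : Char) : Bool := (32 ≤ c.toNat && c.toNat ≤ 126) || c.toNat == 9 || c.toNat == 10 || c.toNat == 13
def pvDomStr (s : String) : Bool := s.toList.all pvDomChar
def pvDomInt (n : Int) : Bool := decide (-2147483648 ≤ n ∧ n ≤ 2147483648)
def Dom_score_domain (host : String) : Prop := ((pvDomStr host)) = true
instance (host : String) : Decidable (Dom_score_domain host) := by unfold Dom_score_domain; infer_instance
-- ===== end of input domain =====

-- B looks up the host's proper dot-suffixes in the trust sets (TLDs stored without the
-- leading dot) instead of A's endswith loops over the constant sets; alternative, same cost.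

-- ===== PORT A =====
def pvHighTlds : List String := [".gov", ".edu", ".gov.uk", ".gov.pt", ".eu"]

def pvHighHosts : List String :=
  ["wikipedia.org", "developer.mozilla.org", "rfc-editor.org",
   "ietf.org", "w3.org", "iana.org", "iso.org",
   "npmjs.com", "pypi.org", "crates.io",
   "react.dev", "nodejs.org", "python.org",
   "github.com", "gitlab.com",
   "anthropic.com", "openai.com", "vercel.com", "railway.com"]

def pvLowHosts : List String :=
  ["bit.ly", "tinyurl.com", "goo.gl", "t.co", "ow.ly",
   "buff.ly", "is.gd", "lnkd.in"]

def score_domain (host : String) : String :=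
  if host = "" then "unknown"
  else
    let h := PySem.Str.stripChars (PySem.Str.lower host) "."
    if pvLowHosts.contains h then "low"
    else if pvLowHosts.any (fun known => PySem.Str.endswith h ("." ++ known)) then "low"
    else if pvHighHosts.contains h then "high"
    else if pvHighHosts.any (fun known => PySem.Str.endswith h ("." ++ known)) then "high"
    else if pvHighTlds.any (fun tld => PySem.Str.endswith h tld) then "high"
    else "medium"

-- ===== PORT B =====
def pvTldLabels : List String := ["gov", "edu", "gov.uk", "gov.pt", "eu"]

-- [host[i+1:] for i, ch in enumerate(host) if ch == "."]  (structural scan over the chars)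
def pvDotSuffixes (cs : List Char) : List (List Char) :=
  match cs with
  | [] => []
  | c :: rest => (if c = '.' then [rest] else []) ++ pvDotSuffixes rest

def score_domain_alt (host : String) : String :=
  if host = "" then "unknown"
  else
    let h := PySem.Str.stripChars (PySem.Str.lower host) "."
    let sufs := pvDotSuffixes h.toList
    if pvLowHosts.contains h || sufs.any (fun s => (pvLowHosts.map String.toList).contains s) then "low"
    else if pvHighHosts.contains h || sufs.any (fun s => (pvHighHosts.map String.toList).contains s) then "high"
    else if sufs.any (fun s => (pvTldLabels.map String.toList).contains s) then "high"
    else "medium"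

-- ===== PRECONDITION & SPEC =====
def Spec_score_domain (host : String) (out : String) : Prop := out = score_domain_alt host
instance (host : String) (out : String) : Decidable (Spec_score_domain host out) := by unfold Spec_score_domain; infer_instance

-- ===== CLAIM (what is proved, stated in full; the proofs are below) =====
def Claim_equal_score_domain : Prop := ∀ (host : String), Dom_score_domain host → Spec_score_domain host (score_domain host)

-- ===== LEMMAS AND PROOFS =====

theorem mem_pvDotSuffixes (cs s : List Char) :
    s ∈ pvDotSuffixes cs ↔ ('.' :: s) <:+ cs := by
  induction cs with
  | nil => simp [pvDotSuffixes]
  | cons c rest ih =>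
    simp only [pvDotSuffixes, List.mem_append, List.suffix_cons_iff, ih]
    constructor
    · rintro (hs | hs)
      · split at hs <;> simp_all
      · exact Or.inr hs
    · rintro (hs | hs)
      · cases hs; simp
      · exact Or.inr hs

theorem any_dotted_eq (cs : List Char) (ks : List String) :
    ks.any (fun k => PySem.Chars.endswith cs ('.' :: k.toList)) =
    (pvDotSuffixes cs).any (fun s => (ks.map String.toList).contains s) := by
  rw [Bool.eq_iff_iff]
  simp only [List.any_eq_true, PySem.Chars.endswith_iff, List.contains_iff_mem,
    List.mem_map, mem_pvDotSuffixes]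
  constructor
  · rintro ⟨k, hk, hsuf⟩
    exact ⟨k.toList, hsuf, k, hk, rfl⟩
  · rintro ⟨s, hsuf, k, hk, hks⟩
    exact ⟨k, hk, hks ▸ hsuf⟩

theorem pv_if_or (a b : Bool) (x y : String) :
    (if (a || b) = true then x else y) = if a = true then x else if b = true then x else y := by
  cases a <;> cases b <;> simp

theorem score_domain_body_eq (h : String) :
    (if pvLowHosts.contains h then "low"
     else if pvLowHosts.any (fun known => PySem.Str.endswith h ("." ++ known)) then "low"
     else if pvHighHosts.contains h then "high"
     else if pvHighHosts.any (fun known => PySem.Str.endswith h ("." ++ known)) then "high"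
     else if pvHighTlds.any (fun tld => PySem.Str.endswith h tld) then "high"
     else "medium") =
    (if pvLowHosts.contains h || (pvDotSuffixes h.toList).any (fun s => (pvLowHosts.map String.toList).contains s) then "low"
     else if pvHighHosts.contains h || (pvDotSuffixes h.toList).any (fun s => (pvHighHosts.map String.toList).contains s) then "high"
     else if (pvDotSuffixes h.toList).any (fun s => (pvTldLabels.map String.toList).contains s) then "high"
     else "medium") := by
  have hbridge : ∀ (k : String), PySem.Str.endswith h ("." ++ k) =
      PySem.Chars.endswith h.toList ('.' :: k.toList) := by
    intro k
    simp [PySem.Str.endswith]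
  have hlow : pvLowHosts.any (fun known => PySem.Str.endswith h ("." ++ known)) =
      (pvDotSuffixes h.toList).any (fun s => (pvLowHosts.map String.toList).contains s) := by
    rw [← any_dotted_eq]
    exact List.any_congr rfl (fun k => hbridge k)
  have hhigh : pvHighHosts.any (fun known => PySem.Str.endswith h ("." ++ known)) =
      (pvDotSuffixes h.toList).any (fun s => (pvHighHosts.map String.toList).contains s) := by
    rw [← any_dotted_eq]
    exact List.any_congr rfl (fun k => hbridge k)
  have htld : pvHighTlds.any (fun tld => PySem.Str.endswith h tld) =
      (pvDotSuffixes h.toList).any (fun s => (pvTldLabels.map String.toList).contains s) := by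
    rw [← any_dotted_eq]
    show ((pvTldLabels.map (fun l => "." ++ l)).any fun tld => PySem.Str.endswith h tld) = _
    rw [List.any_map]
    exact List.any_congr rfl (fun k => hbridge k)
  rw [hlow, hhigh, htld, pv_if_or, pv_if_or]

-- ===== VERDICT (by name: the statement is the Claim_ definition above) =====
theorem score_domain_spec : Claim_equal_score_domain := by
  intro host _
  unfold Spec_score_domain score_domain score_domain_alt
  by_cases he : host = ""
  · simp [he]
  · simp only [he, if_false]
    exact score_domain_body_eq _
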